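-- pv_equiv track=rewrite | github.com/hgrulich/AdventOfCode2021 | src/lada/BujnyPython/AoCsolver/Dec10.py | evaluate_missing
-- ===== SOURCE A (Python) =====
-- def evaluate_missing(line):
--     char_to_value = {')': 1,
--                      ']': 2,
--                      '}': 3,
--                      '>': 4}
--     score = 0
--     for char in line[::-1]:
--         score = 5 * score + char_to_value[char]
--
--     return score
-- ===== SOURCE B (Python) =====
-- def evaluate_missing(line):
--     char_to_value = {')': 1,
--                      ']': 2,
--                      '}': 3,
--                      '>': 4}
--     score = 0
--     power = 1
--     for char in line:
--         score += char_to_value[char] * power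
--         power *= 5
--     return score
-- ===== Notes on version B (the rewrite author's own statement) =====
-- stated objective: alternative
-- what changed: B traverses the line forward with an explicit positional-power accumulator (score += v*power; power *= 5) instead of A's reversed-string Horner fold 5*score + v.
import Mathlib
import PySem

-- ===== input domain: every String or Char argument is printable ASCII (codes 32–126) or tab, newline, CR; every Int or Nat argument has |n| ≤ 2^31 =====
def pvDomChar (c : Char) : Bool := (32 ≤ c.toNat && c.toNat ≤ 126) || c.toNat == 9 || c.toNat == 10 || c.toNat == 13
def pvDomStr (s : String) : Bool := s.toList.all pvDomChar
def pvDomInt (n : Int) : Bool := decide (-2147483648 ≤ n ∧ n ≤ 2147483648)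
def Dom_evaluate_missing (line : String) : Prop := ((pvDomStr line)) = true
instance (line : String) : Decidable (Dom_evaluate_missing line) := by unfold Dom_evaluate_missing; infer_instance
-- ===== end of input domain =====

-- B replaces A's reversed-string Horner fold with a forward pass carrying an explicit
-- positional-power accumulator (alternative decomposition; same O(n) cost).

-- ===== PORT A =====
-- char_to_value, shared verbatim by both Pythons
def pvCharToValue : PySem.Dict Char Int :=
  PySem.Dict.ofList [(')', 1), (']', 2), ('}', 3), ('>', 4)]

-- A: for char in line[::-1]: score = 5*score + char_to_value[char]
-- line[::-1] is reversal (PySem.Str.slice?_none_none_neg_one); the KeyError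
-- case (missing key) is excluded by Pre_, so the lookup uses getD 0 there harmlessly.
def evaluate_missing (line : String) : Int :=
  (line.toList.reverse).foldl
    (fun score c => 5 * score + (pvCharToValue.get? c).getD 0) 0

-- ===== PORT B =====
-- B: forward loop over line with state (score, power)
def evaluate_missing_alt (line : String) : Int :=
  (line.toList.foldl
    (fun (sp : Int × Int) c => (sp.1 + (pvCharToValue.get? c).getD 0 * sp.2, sp.2 * 5))
    (0, 1)).1

-- ===== PRECONDITION & SPEC =====
-- Pre_ excludes lines containing a character outside ")]}>", on which both Pythons raise KeyError.
def Pre_evaluate_missing (line : String) : Prop :=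
  (line.toList.all (fun c => c == ')' || c == ']' || c == '}' || c == '>')) = true
instance (line : String) : Decidable (Pre_evaluate_missing line) := by
  unfold Pre_evaluate_missing; infer_instance

def pvWitness_evaluate_missing : String := "])}>"

def Spec_evaluate_missing (line : String) (out : Int) : Prop := out = evaluate_missing_alt line
instance (line : String) (out : Int) : Decidable (Spec_evaluate_missing line out) := by
  unfold Spec_evaluate_missing; infer_instance

-- ===== CLAIM (what is proved, stated in full; the proofs are below) =====
def Claim_equal_evaluate_missing : Prop := ∀ (line : String), Dom_evaluate_missing line → Pre_evaluate_missing line → Spec_evaluate_missing line (evaluate_missing line)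

-- ===== LEMMAS AND PROOFS =====

-- value of one char (proof-side abbreviation)
def pvVal (c : Char) : Int := (pvCharToValue.get? c).getD 0

-- base-5 value of a char list, first char weighted 1
def pvBase5 : List Char → Int
  | [] => 0
  | c :: t => pvVal c + 5 * pvBase5 t

lemma pvA_char (l : List Char) (s : Int) :
    l.reverse.foldl (fun score c => 5 * score + pvVal c) s
      = s * 5 ^ l.length + pvBase5 l := by
  induction l generalizing s with
  | nil => simp [pvBase5]
  | cons c t ih =>
      simp only [List.reverse_cons, List.foldl_append, List.foldl_cons, List.foldl_nil,
        ih, pvBase5, List.length_cons]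
      ring

lemma pvB_char (l : List Char) (s p : Int) :
    (l.foldl (fun (sp : Int × Int) c => (sp.1 + pvVal c * sp.2, sp.2 * 5)) (s, p)).1
      = s + p * pvBase5 l := by
  induction l generalizing s p with
  | nil => simp [pvBase5]
  | cons c t ih =>
      simp only [List.foldl_cons, ih, pvBase5]
      ring

-- ===== VERDICT (by name: the statement is the Claim_ definition above) =====
theorem evaluate_missing_spec : Claim_equal_evaluate_missing := by
  intro line _ _
  unfold Spec_evaluate_missing evaluate_missing evaluate_missing_alt
  show line.toList.reverse.foldl (fun score c => 5 * score + pvVal c) 0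
      = (line.toList.foldl (fun (sp : Int × Int) c => (sp.1 + pvVal c * sp.2, sp.2 * 5)) (0, 1)).1
  rw [pvA_char, pvB_char]
  ring
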